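-- pv_equiv track=rewrite | github.com/spartan289/PycharmProjects | learn/lenasort.py | lena_sort
-- ===== SOURCE A (Python) =====
-- def lena_sort(nums):
--     c=0
--     if len(nums)<=1 :
--         return nums,c
--     pivot = nums[0]
--     less = []
--     more = []
--     for i in range(1,len(nums)):
--         if nums[i]<pivot:
--             less.append(nums[i])
--         else:
--             more.append(nums[i])
--         c+=1
--     x=0
--     sorted_less,x = lena_sort(less)
--     c+=x
--     sorted_more,x = lena_sort(more)
--     c+=x
--     sorted_less.append(pivot)
--     ans = sorted_less+sorted_more
--
--     return ans,c
-- ===== SOURCE B (Python) =====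
-- def lena_sort(nums):
--     # Output via built-in sort; comparison count = node visits while inserting
--     # each element into a binary search tree (ties go right), built iteratively.
--     c = 0
--     root = None
--     for v in nums:
--         if root is None:
--             root = [v, None, None]
--         else:
--             node = root
--             while True:
--                 c += 1
--                 i = 1 if v < node[0] else 2
--                 if node[i] is None:
--                     node[i] = [v, None, None]
--                     break
--                 node = node[i]
--     return sorted(nums), c
-- ===== Notes on version B (the rewrite author's own statement) =====
-- stated objective: alternative
-- what changed: A's recursive quicksort (partition, recurse, concatenate) is replaced by the built-in sort for the output list and an iterative binary-search-tree insertion loop whose node-visit count reproduces the comparison counter.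
import Mathlib
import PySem

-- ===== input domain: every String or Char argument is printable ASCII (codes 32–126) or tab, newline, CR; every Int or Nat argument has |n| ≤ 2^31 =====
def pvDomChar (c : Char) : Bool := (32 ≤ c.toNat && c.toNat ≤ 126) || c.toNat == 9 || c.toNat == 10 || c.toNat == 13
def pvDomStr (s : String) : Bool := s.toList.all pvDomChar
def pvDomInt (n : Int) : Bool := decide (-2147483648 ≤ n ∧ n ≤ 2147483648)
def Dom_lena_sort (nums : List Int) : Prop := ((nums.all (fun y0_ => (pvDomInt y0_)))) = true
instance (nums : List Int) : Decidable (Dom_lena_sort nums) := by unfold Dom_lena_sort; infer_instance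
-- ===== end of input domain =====

-- B replaces A's recursive quicksort by the built-in sort for the list and a BST-insertion
-- node-visit count for the comparison counter (alternative decomposition, same return value).

-- ===== PORT A =====
-- the partition loop of A, written as a foldl over the tail (less, more, c)
def pvPart (p : Int) (rest : List Int) : List Int × List Int × Int :=
  rest.foldl (fun (s : List Int × List Int × Int) x =>
      if x < p then (s.1 ++ [x], s.2.1, s.2.2 + 1) else (s.1, s.2.1 ++ [x], s.2.2 + 1))
    ([], [], 0)

theorem pvPart_eq (p : Int) (rest : List Int) :
    pvPart p rest
    = (rest.filter (fun x => decide (x < p)),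
       rest.filter (fun x => !decide (x < p)),
       (rest.length : Int)) := by
  have h : ∀ (xs : List Int) (a b : List Int) (c : Int),
      xs.foldl (fun (s : List Int × List Int × Int) x =>
          if x < p then (s.1 ++ [x], s.2.1, s.2.2 + 1) else (s.1, s.2.1 ++ [x], s.2.2 + 1))
        (a, b, c)
      = (a ++ xs.filter (fun x => decide (x < p)),
         b ++ xs.filter (fun x => !decide (x < p)),
         c + (xs.length : Int)) := by
    intro xs
    induction xs with
    | nil => simp
    | cons x xs ih =>
      intro a b c
      by_cases hx : x < p <;> simp [List.foldl_cons, hx, ih] <;> omega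
  simpa [pvPart] using h rest [] [] 0

def lena_sort (nums : List Int) : List Int × Int :=
  if nums.length ≤ 1 then (nums, 0)
  else
    match nums with
    | [] => ([], 0)
    | p :: rest =>
      let s := pvPart p rest
      let rl := lena_sort s.1
      let rm := lena_sort s.2.1
      ((rl.1 ++ [p]) ++ rm.1, (s.2.2 + rl.2) + rm.2)
termination_by nums.length
decreasing_by
  · simp only [pvPart_eq]
    exact Nat.lt_succ_of_le (List.length_filter_le _ _)
  · simp only [pvPart_eq]
    exact Nat.lt_succ_of_le (List.length_filter_le _ _)

-- ===== PORT B =====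
inductive PvTree where
  | leaf : PvTree
  | node : Int → PvTree → PvTree → PvTree
deriving DecidableEq, Repr

-- one BST insertion; the Int is the number of nodes visited (= c increments in B's while loop)
def pvInsert : PvTree → Int → PvTree × Int
  | PvTree.leaf, v => (PvTree.node v PvTree.leaf PvTree.leaf, 0)
  | PvTree.node x l r, v =>
    if v < x then
      let s := pvInsert l v
      (PvTree.node x s.1 r, s.2 + 1)
    else
      let s := pvInsert r v
      (PvTree.node x l s.1, s.2 + 1)

def pvStep (s : PvTree × Int) (v : Int) : PvTree × Int :=
  let t := pvInsert s.1 v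
  (t.1, s.2 + t.2)

def lena_sort_alt (nums : List Int) : List Int × Int :=
  (PySem.List.sorted nums (fun x => x) false, (nums.foldl pvStep (PvTree.leaf, 0)).2)

-- ===== PRECONDITION & SPEC =====
def Spec_lena_sort (nums : List Int) (out : List Int × Int) : Prop := out = lena_sort_alt nums
instance (nums : List Int) (out : List Int × Int) : Decidable (Spec_lena_sort nums out) := by unfold Spec_lena_sort; infer_instance

-- ===== CLAIM (what is proved, stated in full; the proofs are below) =====
def Claim_equal_lena_sort : Prop := ∀ (nums : List Int), Dom_lena_sort nums → Spec_lena_sort nums (lena_sort nums)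

-- ===== LEMMAS AND PROOFS =====

-- counter part of the fold, relative to an arbitrary starting counter
theorem pvStep_snd (xs : List Int) (s : PvTree × Int) :
    (xs.foldl pvStep s).2 = s.2 + (xs.foldl pvStep (s.1, 0)).2 := by
  induction xs generalizing s with
  | nil => simp
  | cons x xs ih =>
    simp only [List.foldl_cons, pvStep]
    rw [ih, ih ((pvInsert s.1 x).1, 0 + (pvInsert s.1 x).2)]
    dsimp only
    omega

-- inserting a list into a node splits into the two subtrees by the pivot comparison
theorem pvCost_node (p : Int) (xs : List Int) (l r : PvTree) :
    (xs.foldl pvStep (PvTree.node p l r, 0)).2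
      = (xs.length : Int)
        + ((xs.filter (fun x => decide (x < p))).foldl pvStep (l, 0)).2
        + ((xs.filter (fun x => !decide (x < p))).foldl pvStep (r, 0)).2 := by
  induction xs generalizing l r with
  | nil => simp
  | cons x xs ih =>
    by_cases hx : x < p
    · rw [show (x :: xs).filter (fun y => decide (y < p)) = x :: xs.filter (fun y => decide (y < p)) by
            simp [hx],
          show (x :: xs).filter (fun y => !decide (y < p)) = xs.filter (fun y => !decide (y < p)) by
            simp [hx]]
      simp only [List.foldl_cons, pvStep, pvInsert, if_pos hx, List.length_cons]
      rw [pvStep_snd xs, ih,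
          pvStep_snd (xs.filter fun y => decide (y < p))
            ((pvInsert l x).1, 0 + (pvInsert l x).2)]
      push_cast
      omega
    · rw [show (x :: xs).filter (fun y => decide (y < p)) = xs.filter (fun y => decide (y < p)) by
            simp [hx],
          show (x :: xs).filter (fun y => !decide (y < p)) = x :: xs.filter (fun y => !decide (y < p)) by
            simp [hx]]
      simp only [List.foldl_cons, pvStep, pvInsert, if_neg hx, List.length_cons]
      rw [pvStep_snd xs, ih,
          pvStep_snd (xs.filter fun y => !decide (y < p))
            ((pvInsert r x).1, 0 + (pvInsert r x).2)]
      push_cast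
      omega

-- the main invariant: A returns (sorted nums, BST cost of nums)
theorem pvMain (nums : List Int) :
    lena_sort nums = (PySem.List.sorted nums (fun x => x) false, (nums.foldl pvStep (PvTree.leaf, 0)).2) := by
  by_cases h1 : nums.length ≤ 1
  · match nums, h1 with
    | [], _ =>
      rw [lena_sort]
      rfl
    | [x], _ =>
      rw [lena_sort, if_pos (by simp : ([x] : List Int).length ≤ 1)]
      rfl
  · match nums with
    | p :: rest =>
      have hA : lena_sort (p :: rest)
          = ((lena_sort (rest.filter (fun x => decide (x < p)))).1 ++ [p]
              ++ (lena_sort (rest.filter (fun x => !decide (x < p)))).1,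
             ((rest.length : Int) + (lena_sort (rest.filter (fun x => decide (x < p)))).2)
              + (lena_sort (rest.filter (fun x => !decide (x < p)))).2) := by
        rw [lena_sort]
        simp only [h1, if_false, pvPart_eq]
      rw [hA, pvMain (rest.filter (fun x => decide (x < p))),
          pvMain (rest.filter (fun x => !decide (x < p)))]
      have hcost : ((p :: rest).foldl pvStep (PvTree.leaf, 0)).2
          = (rest.length : Int)
            + ((rest.filter (fun x => decide (x < p))).foldl pvStep (PvTree.leaf, 0)).2
            + ((rest.filter (fun x => !decide (x < p))).foldl pvStep (PvTree.leaf, 0)).2 := by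
        simp only [List.foldl_cons, pvStep, pvInsert]
        rw [pvStep_snd, pvCost_node]
        omega
      have hperm : (PySem.List.sorted (rest.filter (fun x => decide (x < p))) (fun x => x) false
            ++ p :: PySem.List.sorted (rest.filter (fun x => !decide (x < p))) (fun x => x) false).Perm
            (p :: rest) := by
        have h2 : (rest.filter (fun x => decide (x < p))
              ++ rest.filter (fun x => !decide (x < p))).Perm rest := List.filter_append_perm _ rest
        have h3 := List.Perm.append
          (PySem.List.sorted_perm (rest.filter (fun x => decide (x < p))) (fun x => x) false)
          (List.Perm.cons p
            (PySem.List.sorted_perm (rest.filter (fun x => !decide (x < p))) (fun x => x) false))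
        exact h3.trans (List.perm_middle.trans (h2.cons p))
      have hpw : (PySem.List.sorted (rest.filter (fun x => decide (x < p))) (fun x => x) false
            ++ p :: PySem.List.sorted (rest.filter (fun x => !decide (x < p))) (fun x => x) false).Pairwise (· ≤ ·) := by
        rw [List.pairwise_append]
        refine ⟨PySem.List.sorted_pairwise _ _, ?_, ?_⟩
        · rw [List.pairwise_cons]
          constructor
          · intro y hy
            have := (PySem.List.mem_sorted _ _ _ _).1 hy
            have := List.of_mem_filter this
            simpa using this
          · exact PySem.List.sorted_pairwise _ _
        · intro a ha b hb
          have ha' := List.of_mem_filter ((PySem.List.mem_sorted _ _ _ _).1 ha)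
          have ha2 : a < p := by simpa using ha'
          rcases List.mem_cons.1 hb with hb | hb
          · rw [hb]; exact le_of_lt ha2
          · have hb' := List.of_mem_filter ((PySem.List.mem_sorted _ _ _ _).1 hb)
            have hb2 : ¬ b < p := by simpa using hb'
            exact le_of_lt (lt_of_lt_of_le ha2 (not_lt.1 hb2))
      have hsorted : PySem.List.sorted (p :: rest) (fun x => x) false
          = PySem.List.sorted (rest.filter (fun x => decide (x < p))) (fun x => x) false
            ++ p :: PySem.List.sorted (rest.filter (fun x => !decide (x < p))) (fun x => x) false :=
        PySem.List.sorted_id_eq_of_perm_of_pairwise _ _ hperm hpw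
      simp only [Prod.mk.injEq]
      refine ⟨?_, ?_⟩
      · simp [hsorted]
      · rw [hcost]
termination_by nums.length
decreasing_by
  · exact Nat.lt_succ_of_le (List.length_filter_le _ _)
  · exact Nat.lt_succ_of_le (List.length_filter_le _ _)

-- ===== VERDICT (by name: the statement is the Claim_ definition above) =====
theorem lena_sort_spec : Claim_equal_lena_sort := by
  intro nums _
  unfold Spec_lena_sort lena_sort_alt
  exact pvMain nums
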